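-- pv_equiv track=rewrite | github.com/Konark-Web/RussiansRipBot | bot/services/statistics_service.py | _format_weekly_statistics_html
-- ===== SOURCE A (Python) =====
-- def _format_weekly_statistics_html(records: list, date_from: str, date_to: str) -> str:
--     weekly_inc = {}
--
--     # Categories to sum up
--     categories = [
--         ("personnel_units", "особового складу"),
--         ("tanks", "танків"),
--         ("armoured_fighting_vehicles", "ББМ"),
--         ("artillery_systems", "арт. систем"),
--         ("mlrs", "РСЗВ"),
--         ("aa_warfare_systems", "засобів ППО"),
--         ("planes", "літаків"),
--         ("helicopters", "гелікоптерів"),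
--         ("vehicles_fuel_tanks", "автотехніки та автоцистерн"),
--         ("warships_cutters", "кораблів та катерів"),
--         ("uav_systems", "БПЛА"),
--         ("special_military_equip", "спец. техніки"),
--         ("submarines", "підводних човнів"),
--         ("cruise_missiles", "крилатих ракет"),
--     ]
--
--     for record in records:
--         inc = record["increase"]
--         for key, _ in categories:
--             weekly_inc[key] = weekly_inc.get(key, 0) + inc.get(key, 0)
--
--     def fmt(val: int) -> str:
--         return f"{val:,}".replace(",", " ")
--
--     lines = [
--         f"<b>📊 ТИЖНЕВИЙ ЗВІТ ({date_from} — {date_to})</b>",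
--         "<i>За цей тиждень армія рф стала меншою на:</i>",
--         "",
--     ]
--
--     for key, label in categories:
--         val = weekly_inc.get(key, 0)
--         if val > 0:
--             lines.append(f"<b>{fmt(val)}</b> — {label}")
--
--     lines.extend([
--         "",
--         "<i>СЛАВА ЗСУ! 🇺🇦</i>",
--         "<i>Донат на ЗСУ наближає перемогу -> /donate</i>"
--     ])
--
--     return "\n".join(lines)
-- ===== SOURCE B (Python) =====
-- def _format_weekly_statistics_html(records: list, date_from: str, date_to: str) -> str:
--     keys = [
--         "personnel_units", "tanks", "armoured_fighting_vehicles",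
--         "artillery_systems", "mlrs", "aa_warfare_systems", "planes",
--         "helicopters", "vehicles_fuel_tanks", "warships_cutters",
--         "uav_systems", "special_military_equip", "submarines",
--         "cruise_missiles",
--     ]
--     labels = [
--         "особового складу", "танків", "ББМ", "арт. систем", "РСЗВ",
--         "засобів ППО", "літаків", "гелікоптерів",
--         "автотехніки та автоцистерн", "кораблів та катерів", "БПЛА",
--         "спец. техніки", "підводних човнів", "крилатих ракет",
--     ]
--
--     def fmt(val: int) -> str:
--         sign = "-" if val < 0 else ""
--         s = str(abs(val))
--         groups = []
--         while len(s) > 3: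
--             groups = [s[-3:]] + groups
--             s = s[:-3]
--         return sign + " ".join([s] + groups)
--
--     def body(ks, ls):
--         if not ks:
--             return []
--         total = sum(record["increase"].get(ks[0], 0) for record in records)
--         rest = body(ks[1:], ls[1:])
--         if total > 0:
--             return ["<b>%s</b> — %s" % (fmt(total), ls[0])] + rest
--         return rest
--
--     return "\n".join(
--         ["<b>📊 ТИЖНЕВИЙ ЗВІТ (%s — %s)</b>" % (date_from, date_to),
--          "<i>За цей тиждень армія рф стала меншою на:</i>",
--          ""]
--         + body(keys, labels)
--         + ["",
--            "<i>СЛАВА ЗСУ! 🇺🇦</i>",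
--            "<i>Донат на ЗСУ наближає перемогу -> /donate</i>"])
-- ===== Notes on version B (the rewrite author's own statement) =====
-- stated objective: alternative
-- what changed: Drops the weekly_inc dict and its records-outer/categories-inner accumulation pass: B recurses once over parallel key/label lists, summing each key directly over the records, and formats thousands groups with an explicit chunking loop joined by spaces instead of format-with-commas-then-replace.
import Mathlib
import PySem

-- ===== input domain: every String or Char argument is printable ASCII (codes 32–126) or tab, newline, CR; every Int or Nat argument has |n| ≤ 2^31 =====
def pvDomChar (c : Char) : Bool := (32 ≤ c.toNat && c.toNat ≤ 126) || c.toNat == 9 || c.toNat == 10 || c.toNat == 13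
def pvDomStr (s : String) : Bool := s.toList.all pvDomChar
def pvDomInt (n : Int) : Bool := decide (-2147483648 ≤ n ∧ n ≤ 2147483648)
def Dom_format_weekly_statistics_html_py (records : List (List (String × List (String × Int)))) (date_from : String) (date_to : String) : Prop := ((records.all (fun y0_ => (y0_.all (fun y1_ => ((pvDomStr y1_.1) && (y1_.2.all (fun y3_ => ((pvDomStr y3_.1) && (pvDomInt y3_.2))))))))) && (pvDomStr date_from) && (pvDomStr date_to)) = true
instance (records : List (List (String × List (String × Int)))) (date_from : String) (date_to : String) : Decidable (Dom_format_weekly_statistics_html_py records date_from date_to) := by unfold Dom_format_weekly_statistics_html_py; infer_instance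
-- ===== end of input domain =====

-- B replaces the dict-accumulation pass by a direct per-category recursion (parallel key/label
-- lists, per-key sum over the records) and formats thousands groups with an explicit chunking
-- loop joined by spaces instead of format-with-commas-then-replace; objective: alternative.

-- ===== PORT A =====
-- the categories table of A: list of (key, label) pairs
def pyCategories : List (String × String) :=
  [("personnel_units", "особового складу"),
   ("tanks", "танків"),
   ("armoured_fighting_vehicles", "ББМ"),
   ("artillery_systems", "арт. систем"),
   ("mlrs", "РСЗВ"),
   ("aa_warfare_systems", "засобів ППО"),
   ("planes", "літаків"),
   ("helicopters", "гелікоптерів"),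
   ("vehicles_fuel_tanks", "автотехніки та автоцистерн"),
   ("warships_cutters", "кораблів та катерів"),
   ("uav_systems", "БПЛА"),
   ("special_military_equip", "спец. техніки"),
   ("submarines", "підводних човнів"),
   ("cruise_missiles", "крилатих ракет")]

-- f"{val:,}": comma-grouping of the digit string, three digits from the right
-- (hand-ported; exact for Python's ',' format spec on int)
def pyGroup3 (ds : List Char) : List Char :=
  if _h : ds.length ≤ 3 then ds
  else pyGroup3 (ds.take (ds.length - 3)) ++ ',' :: ds.drop (ds.length - 3)
termination_by ds.length
decreasing_by simp; omega

-- fmt of A: f"{val:,}".replace(",", " ")  (the format spec groups the digits, sign kept in front)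
def pyFmt (val : Int) : String :=
  String.ofList (PySem.Chars.replace
    (if val < 0 then '-' :: pyGroup3 (PySem.Int.toChars (-val))
     else pyGroup3 (PySem.Int.toChars val)) [','] [' '])

-- record["increase"]; the getD [] default is unreachable inside Pre_ (KeyError in Python)
def pyIncOf (record : List (String × List (String × Int))) : PySem.Dict String Int :=
  PySem.Dict.ofList ((PySem.Dict.ofList record).getD "increase" [])

def format_weekly_statistics_html_py (records : List (List (String × List (String × Int)))) (date_from : String) (date_to : String) : String :=
  -- for record in records: for key, _ in categories: weekly_inc[key] = weekly_inc.get(key,0) + inc.get(key,0)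
  let weekly_inc : PySem.Dict String Int :=
    records.foldl (fun w record =>
      let inc := pyIncOf record
      pyCategories.foldl (fun w kv => w.insert kv.1 (w.getD kv.1 0 + inc.getD kv.1 0)) w)
      PySem.Dict.empty
  let lines := ["<b>📊 ТИЖНЕВИЙ ЗВІТ (" ++ date_from ++ " — " ++ date_to ++ ")</b>",
                "<i>За цей тиждень армія рф стала меншою на:</i>",
                ""]
  -- for key, label in categories: if val > 0: lines.append(...)
  let lines := pyCategories.foldl (fun ls kv =>
      let val := weekly_inc.getD kv.1 0
      if val > 0 then ls ++ ["<b>" ++ pyFmt val ++ "</b> — " ++ kv.2] else ls) lines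
  let lines := lines ++ ["", "<i>СЛАВА ЗСУ! 🇺🇦</i>", "<i>Донат на ЗСУ наближає перемогу -> /donate</i>"]
  PySem.Str.join "\n" lines

-- ===== PORT B =====
-- B keeps the category keys and labels as two parallel flat lists
def altKeys : List String :=
  ["personnel_units", "tanks", "armoured_fighting_vehicles",
   "artillery_systems", "mlrs", "aa_warfare_systems", "planes",
   "helicopters", "vehicles_fuel_tanks", "warships_cutters",
   "uav_systems", "special_military_equip", "submarines",
   "cruise_missiles"]

def altLabels : List String :=
  ["особового складу", "танків", "ББМ", "арт. систем", "РСЗВ",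
   "засобів ППО", "літаків", "гелікоптерів",
   "автотехніки та автоцистерн", "кораблів та катерів", "БПЛА",
   "спец. техніки", "підводних човнів", "крилатих ракет"]

-- while len(s) > 3: groups = [s[-3:]] + groups; s = s[:-3]  — returns [s] + groups
-- (s[-3:] / s[:-3] hand-ported as drop/take of len-3; exact since len(s) > 3 there)
def altChunk (s : List Char) (groups : List (List Char)) : List (List Char) :=
  if _h : 3 < s.length then
    altChunk (s.take (s.length - 3)) (s.drop (s.length - 3) :: groups)
  else s :: groups
termination_by s.length
decreasing_by simp; omega

-- fmt of B: sign + " ".join(chunks of str(abs(val)))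
def altFmt (val : Int) : String :=
  String.ofList ((if val < 0 then ['-'] else [])
    ++ PySem.Chars.join [' '] (altChunk (PySem.Int.toChars (val.natAbs : Int)) []))

-- def body(ks, ls): recursion over the two parallel lists
def altBody (records : List (List (String × List (String × Int)))) : List String → List String → List String
  | [], _ => []
  | _ :: _, [] => []   -- unreachable at the call site: keys and labels have equal length 14
  | k :: kt, l :: lt =>
      let total := records.foldl (fun a record =>
        a + (PySem.Dict.ofList ((PySem.Dict.ofList record).getD "increase" [])).getD k 0) 0
      let rest := altBody records kt lt
      if total > 0 then ("<b>" ++ altFmt total ++ "</b> — " ++ l) :: rest else rest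

def format_weekly_statistics_html_py_alt (records : List (List (String × List (String × Int)))) (date_from : String) (date_to : String) : String :=
  PySem.Str.join "\n"
    (["<b>📊 ТИЖНЕВИЙ ЗВІТ (" ++ date_from ++ " — " ++ date_to ++ ")</b>",
      "<i>За цей тиждень армія рф стала меншою на:</i>",
      ""]
     ++ altBody records altKeys altLabels
     ++ ["", "<i>СЛАВА ЗСУ! 🇺🇦</i>", "<i>Донат на ЗСУ наближає перемогу -> /donate</i>"])

-- ===== PRECONDITION & SPEC =====
-- Pre_ excludes exactly the records without an "increase" key, on which the Python A raises KeyError.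
def Pre_format_weekly_statistics_html_py (records : List (List (String × List (String × Int)))) (date_from : String) (date_to : String) : Prop :=
  ∀ r ∈ records, "increase" ∈ r.map Prod.fst

instance (records : List (List (String × List (String × Int)))) (date_from : String) (date_to : String) : Decidable (Pre_format_weekly_statistics_html_py records date_from date_to) := by unfold Pre_format_weekly_statistics_html_py; infer_instance

def pvWitness_format_weekly_statistics_html_py : (List (List (String × List (String × Int)))) × String × String :=
  ([[("increase", [("tanks", 3)])]], "01.01", "07.01")

def Spec_format_weekly_statistics_html_py (records : List (List (String × List (String × Int)))) (date_from : String) (date_to : String) (out : String) : Prop := out = format_weekly_statistics_html_py_alt records date_from date_to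
instance (records : List (List (String × List (String × Int)))) (date_from : String) (date_to : String) (out : String) : Decidable (Spec_format_weekly_statistics_html_py records date_from date_to out) := by unfold Spec_format_weekly_statistics_html_py; infer_instance

-- ===== CLAIM (what is proved, stated in full; the proofs are below) =====
def Claim_equal_format_weekly_statistics_html_py : Prop := ∀ (records : List (List (String × List (String × Int)))) (date_from : String) (date_to : String), Dom_format_weekly_statistics_html_py records date_from date_to → Pre_format_weekly_statistics_html_py records date_from date_to → Spec_format_weekly_statistics_html_py records date_from date_to (format_weekly_statistics_html_py records date_from date_to)

-- ===== LEMMAS AND PROOFS =====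

-- abbreviation used only by the proofs: the weekly total of one key
def keySum (records : List (List (String × List (String × Int)))) (k : String) : Int :=
  (records.map (fun record => (pyIncOf record).getD k 0)).sum

-- A's inner category loop adds inc[k] once per occurrence of k in cats
lemma inner_getD (inc : PySem.Dict String Int) (cats : List (String × String))
    (w : PySem.Dict String Int) (k : String) :
    (cats.foldl (fun w kv => w.insert kv.1 (w.getD kv.1 0 + inc.getD kv.1 0)) w).getD k 0
      = w.getD k 0 + (cats.countP (fun kv => kv.1 == k) : Int) * inc.getD k 0 := by
  induction cats generalizing w with
  | nil => simp
  | cons kv tl ih =>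
    simp only [List.foldl_cons, ih, List.countP_cons]
    rw [PySem.Dict.getD_insert]
    by_cases h : k = kv.1
    · simp [h]; ring
    · have h2 : (kv.1 == k) = false := beq_eq_false_iff_ne.mpr (Ne.symm h)
      simp [h, h2]

-- A's records loop accumulates, per key, the per-record increases
lemma outer_getD (records : List (List (String × List (String × Int))))
    (w : PySem.Dict String Int) (k : String) :
    ((records.foldl (fun w record =>
        let inc := pyIncOf record
        pyCategories.foldl (fun w kv => w.insert kv.1 (w.getD kv.1 0 + inc.getD kv.1 0)) w) w).getD k 0)
      = w.getD k 0 + (pyCategories.countP (fun kv => kv.1 == k) : Int) * keySum records k := by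
  induction records generalizing w with
  | nil => simp [keySum]
  | cons r tl ih =>
    simp only [List.foldl_cons, ih, inner_getD, keySum, List.map_cons, List.sum_cons]
    ring

-- each category key occurs exactly once in the table
lemma cat_count_one : ∀ kv ∈ pyCategories, (pyCategories.countP (fun p => p.1 == kv.1)) = 1 := by
  decide

-- single-character replace is a character map (go carries fuel ≥ length)
lemma replace_go_comma (fuel : Nat) (l acc : List Char) (h : l.length ≤ fuel) :
    PySem.Chars.replace.go [','] [' '] fuel l acc
      = acc.reverse ++ l.map (fun c => if c = ',' then ' ' else c) := by
  induction fuel generalizing l acc with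
  | zero =>
    have : l = [] := List.eq_nil_of_length_eq_zero (Nat.le_zero.mp h)
    subst this; simp [PySem.Chars.replace.go]
  | succ n ih =>
    cases l with
    | nil => simp [PySem.Chars.replace.go]
    | cons c t =>
      simp only [PySem.Chars.replace.go]
      by_cases hc : c = ','
      · have hp : [','].isPrefixOf (c :: t) = true := by simp [hc, List.isPrefixOf]
        simp only [hp]
        rw [ih _ _ (by simpa using Nat.le_of_succ_le_succ h)]
        simp [hc]
      · have hp : [','].isPrefixOf (c :: t) = false := by
          simp [List.isPrefixOf]; exact fun hh => absurd hh.symm hc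
        simp only [hp]
        rw [if_neg (by simp), ih _ _ (by simpa using Nat.le_of_succ_le_succ h)]
        simp [hc]

lemma replace_comma (l : List Char) :
    PySem.Chars.replace l [','] [' '] = l.map (fun c => if c = ',' then ' ' else c) := by
  simp only [PySem.Chars.replace, List.isEmpty]
  rw [if_neg (by simp)]
  exact replace_go_comma l.length l [] (le_refl _)

-- the chunking loop's accumulator splits off
lemma altChunk_append (s : List Char) (gs : List (List Char)) :
    altChunk s gs = altChunk s [] ++ gs := by
  by_cases hg : gs = []
  · subst hg; simp
  by_cases h : 3 < s.length
  · have e1 : altChunk s gs = altChunk (s.take (s.length - 3)) (s.drop (s.length - 3) :: gs) := by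
      rw [altChunk, dif_pos h]
    have e2 : altChunk s [] = altChunk (s.take (s.length - 3)) [s.drop (s.length - 3)] := by
      rw [altChunk, dif_pos h]
    rw [e1, e2, altChunk_append (s.take (s.length - 3)) (s.drop (s.length - 3) :: gs),
        altChunk_append (s.take (s.length - 3)) [s.drop (s.length - 3)]]
    simp
  · have e1 : altChunk s gs = s :: gs := by rw [altChunk, dif_neg h]
    have e2 : altChunk s [] = [s] := by rw [altChunk, dif_neg h]
    rw [e1, e2]; simp
termination_by s.length
decreasing_by all_goals (simp; omega)

lemma altChunk_ne_nil (s : List Char) (gs : List (List Char)) : altChunk s gs ≠ [] := by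
  fun_induction altChunk s gs with
  | case1 s gs h ih => exact ih
  | case2 s gs h => simp

-- appending a last group to a nonempty group list
lemma intercalate_snoc (gs : List (List Char)) (g : List Char) (h : gs ≠ []) :
    [' '].intercalate (gs ++ [g]) = [' '].intercalate gs ++ ' ' :: g := by
  induction gs with
  | nil => simp at h
  | cons a tl ih =>
    cases tl with
    | nil => simp [List.intercalate]
    | cons b tl2 => simp only [List.intercalate] at *; simp_all [List.intersperse]

-- comma-grouping then comma→space equals space-joined chunks, for comma-free digits
lemma group3_eq_chunks (ds : List Char) (hds : ∀ c ∈ ds, c ≠ ',') :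
    (pyGroup3 ds).map (fun c => if c = ',' then ' ' else c)
      = PySem.Chars.join [' '] (altChunk ds []) := by
  fun_induction pyGroup3 ds with
  | case1 ds h =>
    rw [altChunk, dif_neg (by omega)]
    simp only [PySem.Chars.join, List.intercalate, List.intersperse, List.flatten]
    rw [List.map_congr_left (fun c hc => if_neg (hds c hc)), List.map_id']
    simp
  | case2 ds h ih =>
    have htake : ∀ c ∈ ds.take (ds.length - 3), c ≠ ',' :=
      fun c hc => hds c (List.mem_of_mem_take hc)
    have hdrop : ∀ c ∈ ds.drop (ds.length - 3), c ≠ ',' :=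
      fun c hc => hds c (List.mem_of_mem_drop hc)
    rw [altChunk, dif_pos (by omega), altChunk_append]
    simp only [List.map_append, List.map_cons]
    rw [ih htake, List.map_congr_left (fun c hc => if_neg (hdrop c hc)), List.map_id']
    simp only [PySem.Chars.join]
    rw [intercalate_snoc _ _ (altChunk_ne_nil _ _)]
    simp

-- digits of Nat.toDigits 10 are never commas
lemma digitChar_ne_comma (m : Nat) (h : m < 10) : m.digitChar ≠ ',' := by
  interval_cases m <;> decide

lemma toDigitsCore_no_comma (fuel : Nat) :
    ∀ (n : Nat) (ds : List Char), (∀ c ∈ ds, c ≠ ',') →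
      ∀ c ∈ Nat.toDigitsCore 10 fuel n ds, c ≠ ',' := by
  induction fuel with
  | zero => intro n ds hds c hc; exact hds c hc
  | succ f ih =>
    intro n ds hds c hc
    simp only [Nat.toDigitsCore] at hc
    by_cases h0 : n / 10 = 0
    · rw [if_pos h0] at hc
      rcases List.mem_cons.mp hc with h | h
      · subst h; exact digitChar_ne_comma _ (Nat.mod_lt _ (by norm_num))
      · exact hds c h
    · rw [if_neg h0] at hc
      refine ih _ _ ?_ c hc
      intro c' hc'
      rcases List.mem_cons.mp hc' with h | h
      · subst h; exact digitChar_ne_comma _ (Nat.mod_lt _ (by norm_num))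
      · exact hds c' h

lemma toDigits_no_comma (n : Nat) : ∀ c ∈ Nat.toDigits 10 n, c ≠ ',' :=
  toDigitsCore_no_comma (n + 1) n [] (by simp)

-- the two thousands-formatters agree on every integer
lemma fmt_eq (val : Int) : pyFmt val = altFmt val := by
  unfold pyFmt altFmt
  rw [replace_comma]
  by_cases h : val < 0
  · have h1 : PySem.Int.toChars (-val) = Nat.toDigits 10 val.natAbs := by
      simp only [PySem.Int.toChars]
      rw [if_neg (by omega)]
      congr 1; omega
    have h2 : PySem.Int.toChars ((val.natAbs : Nat) : Int) = Nat.toDigits 10 val.natAbs := by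
      simp only [PySem.Int.toChars]
      rw [if_neg (not_lt.mpr (Int.natCast_nonneg val.natAbs))]
      congr 1
    simp only [if_pos h, h1, h2, List.map_cons]
    rw [if_neg (by decide), group3_eq_chunks _ (toDigits_no_comma _)]
    simp
  · have h1 : PySem.Int.toChars val = Nat.toDigits 10 val.natAbs := by
      simp only [PySem.Int.toChars]
      rw [if_neg h]
      congr 1; omega
    have h2 : PySem.Int.toChars ((val.natAbs : Nat) : Int) = Nat.toDigits 10 val.natAbs := by
      simp only [PySem.Int.toChars]
      rw [if_neg (not_lt.mpr (Int.natCast_nonneg val.natAbs))]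
      congr 1
    simp only [if_neg h, h1, h2]
    rw [group3_eq_chunks _ (toDigits_no_comma _)]
    simp

-- B's total accumulator is keySum
lemma total_eq (records : List (List (String × List (String × Int)))) (k : String) :
    records.foldl (fun a record =>
        a + (PySem.Dict.ofList ((PySem.Dict.ofList record).getD "increase" [])).getD k 0) 0
      = keySum records k := by
  rw [PySem.List.foldl_add]
  simp [keySum, pyIncOf]

-- B's recursion over the parallel lists is a filter-map over their zip
lemma altBody_eq (records : List (List (String × List (String × Int)))) :
    ∀ (ks ls : List String),
      altBody records ks ls
        = ((ks.zip ls).filter (fun kv => decide (0 < keySum records kv.1))).map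
            (fun kv => "<b>" ++ pyFmt (keySum records kv.1) ++ "</b> — " ++ kv.2) := by
  intro ks
  induction ks with
  | nil => intro ls; simp [altBody]
  | cons k kt ih =>
    intro ls
    cases ls with
    | nil => simp [altBody]
    | cons l lt =>
      simp only [altBody, ih lt, total_eq, List.zip_cons_cons, List.filter_cons]
      by_cases h : 0 < keySum records k
      · simp [h, fmt_eq]
      · simp [h]

-- the pair table is the zip of the two flat lists
lemma cats_zip : altKeys.zip altLabels = pyCategories := by decide

-- ===== VERDICT (by name: the statement is the Claim_ definition above) =====
theorem format_weekly_statistics_html_py_spec : Claim_equal_format_weekly_statistics_html_py := by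
  intro records date_from date_to _hDom _hPre
  unfold Spec_format_weekly_statistics_html_py
  unfold format_weekly_statistics_html_py format_weekly_statistics_html_py_alt
  dsimp only
  rw [altBody_eq, cats_zip]
  have hval : ∀ kv ∈ pyCategories,
      ((records.foldl (fun w record =>
          let inc := pyIncOf record
          pyCategories.foldl (fun w kv => w.insert kv.1 (w.getD kv.1 0 + inc.getD kv.1 0)) w)
        PySem.Dict.empty).getD kv.1 0)
        = keySum records kv.1 := by
    intro kv hkv
    rw [outer_getD, cat_count_one kv hkv]
    simp
  rw [PySem.List.foldl_congr_mem' pyCategories _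
      (fun ls kv =>
        if decide (0 < keySum records kv.1) = true
        then ls ++ ["<b>" ++ pyFmt (keySum records kv.1) ++ "</b> — " ++ kv.2]
        else ls)
      _ (by
        intro kv hkv ls
        dsimp only
        rw [hval kv hkv]
        by_cases h : 0 < keySum records kv.1
        · rw [if_pos h, if_pos (by simpa using h)]
        · rw [if_neg h, if_neg (by simpa using h)])]
  rw [PySem.List.foldl_append_if (fun kv => decide (0 < keySum records kv.1))
      (fun kv => "<b>" ++ pyFmt (keySum records kv.1) ++ "</b> — " ++ kv.2) pyCategories]
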